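-- pv_equiv track=rewrite | github.com/vboesu/cs262 | final/db_proxy/utils.py | is_strong_query
-- ===== SOURCE A (Python) =====
-- def is_strong_query(query_columns: list[str], strong_columns: list[str]):
--     query_tables = set(col.split(".")[0] for col in query_columns)
--     strong_tables = set(
--         col.split(".")[0] for col in strong_columns if col.split(".")[1] == "*"
--     )
--
--     # A query is strong if there is any column in it which is strong or if there is
--     # any column in a table marked as strong
--     return bool(query_tables & strong_tables) | bool(
--         set(query_columns) & set(strong_columns)
--     )
-- ===== SOURCE B (Python) =====
-- def is_strong_query(query_columns, strong_columns):
--     # Encode each side as a list of tagged keys, sort both, and detect a shared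
--     # key with a two-pointer merge scan (no hash sets, no intersections).
--     strong_keys = []
--     for s in strong_columns:
--         parts = s.split(".")
--         if parts[1] == "*":
--             strong_keys.append("T" + parts[0])
--         strong_keys.append("C" + s)
--     query_keys = []
--     for q in query_columns:
--         query_keys.append("C" + q)
--         query_keys.append("T" + q.split(".")[0])
--     query_keys.sort()
--     strong_keys.sort()
--     i = j = 0
--     while i < len(query_keys) and j < len(strong_keys):
--         if query_keys[i] == strong_keys[j]:
--             return True
--         if query_keys[i] < strong_keys[j]:
--             i += 1
--         else:
--             j += 1
--     return False
-- ===== Notes on version B (the rewrite author's own statement) =====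
-- stated objective: alternative
-- what changed: B encodes each column/wildcard-table as a tagged key string, sorts both key lists, and detects a shared key with a two-pointer merge scan, instead of A's hash-set constructions and set intersections.
-- outside the precondition, e.g. on is_strong_query(['a.x'], ['nodot']): A raises IndexError, B raises IndexError
import Mathlib
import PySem

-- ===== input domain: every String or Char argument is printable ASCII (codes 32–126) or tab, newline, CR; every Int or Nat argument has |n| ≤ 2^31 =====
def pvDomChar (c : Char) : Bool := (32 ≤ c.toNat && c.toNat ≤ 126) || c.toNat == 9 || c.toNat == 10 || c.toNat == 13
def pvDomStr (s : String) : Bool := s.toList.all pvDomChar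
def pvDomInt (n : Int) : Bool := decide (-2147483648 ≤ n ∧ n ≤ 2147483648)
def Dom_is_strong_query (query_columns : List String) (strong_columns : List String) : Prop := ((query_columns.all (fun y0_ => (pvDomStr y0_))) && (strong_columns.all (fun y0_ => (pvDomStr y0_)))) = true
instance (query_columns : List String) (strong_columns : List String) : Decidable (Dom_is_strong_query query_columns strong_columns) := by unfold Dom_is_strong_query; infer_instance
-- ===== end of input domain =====

-- B replaces A's hash-set intersections by a sort-and-merge scan over tagged keys (alternative algorithm).

-- ===== PORT A =====
-- col.split(".")[0] — splitOn with a nonempty separator never returns [], so headD is exact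
def pvSplit (c : String) : List String := (PySem.Str.split? c ".").getD []
def pvTbl (c : String) : String := (pvSplit c).headD ""

def is_strong_query (query_columns : List String) (strong_columns : List String) : Bool :=
  let query_tables : PySem.Set String := PySem.Set.ofList (query_columns.map pvTbl)
  let strong_tables : PySem.Set String :=
    PySem.Set.ofList
      ((strong_columns.filter (fun c => ((pvSplit c).getD 1 "") == "*")).map pvTbl)
  (!(PySem.Set.inter query_tables strong_tables).isEmpty)
    || (!(PySem.Set.inter (PySem.Set.ofList query_columns) (PySem.Set.ofList strong_columns)).isEmpty)

-- ===== PORT B =====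
-- strong_keys loop: per strong column append "T"+table when wildcarded, then always "C"+column
def pvStrongKeys (strong_columns : List String) : List String :=
  strong_columns.foldl
    (fun acc s =>
      acc ++ (if ((pvSplit s).getD 1 "") == "*"
              then ["T" ++ pvTbl s, "C" ++ s] else ["C" ++ s])) []

-- query_keys loop: per query column append "C"+column then "T"+table
def pvQueryKeys (query_columns : List String) : List String :=
  query_columns.foldl (fun acc q => acc ++ ["C" ++ q, "T" ++ pvTbl q]) []

-- the two-pointer merge scan over the two sorted key lists (the while loop of Source B)
def pvMergeHit : List String → List String → Bool
  | [], _ => false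
  | _ :: _, [] => false
  | x :: xs, y :: ys =>
    if x == y then true
    else if x < y then pvMergeHit xs (y :: ys)
    else pvMergeHit (x :: xs) ys
termination_by a b => a.length + b.length

def is_strong_query_alt (query_columns : List String) (strong_columns : List String) : Bool :=
  let strong_keys := pvStrongKeys strong_columns
  let query_keys := pvQueryKeys query_columns
  pvMergeHit (PySem.List.sorted query_keys (fun x => x) false)
             (PySem.List.sorted strong_keys (fun x => x) false)

-- ===== PRECONDITION & SPEC =====
-- Pre_ excludes strong columns without a "." — there col.split(".")[1] raises IndexError in A (and in B).
def Pre_is_strong_query (query_columns : List String) (strong_columns : List String) : Prop :=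
  (strong_columns.all (fun c => PySem.Str.isIn "." c)) = true
instance (query_columns : List String) (strong_columns : List String) : Decidable (Pre_is_strong_query query_columns strong_columns) := by unfold Pre_is_strong_query; infer_instance

def pvWitness_is_strong_query : List String × List String := (["a.x", "b.y"], ["a.*", "c.z"])

def Spec_is_strong_query (query_columns : List String) (strong_columns : List String) (out : Bool) : Prop := out = is_strong_query_alt query_columns strong_columns
instance (query_columns : List String) (strong_columns : List String) (out : Bool) : Decidable (Spec_is_strong_query query_columns strong_columns out) := by unfold Spec_is_strong_query; infer_instance

-- ===== CLAIM (what is proved, stated in full; the proofs are below) =====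
def Claim_equal_is_strong_query : Prop := ∀ (query_columns : List String) (strong_columns : List String), Dom_is_strong_query query_columns strong_columns → Pre_is_strong_query query_columns strong_columns → Spec_is_strong_query query_columns strong_columns (is_strong_query query_columns strong_columns)

-- ===== LEMMAS AND PROOFS =====

theorem tag_inj {t : String} {a b : String} (h : t ++ a = t ++ b) : a = b := by
  have h' := congrArg String.toList h
  simp only [String.toList_append, List.append_cancel_left_eq] at h'
  exact String.toList_inj.mp h'

theorem tag_CT_ne (a b : String) : ("C" ++ a : String) ≠ "T" ++ b := by
  intro h
  have h' := congrArg String.toList h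
  simp at h'

theorem isEmpty_false_iff_exists {α : Type} (l : List α) :
    l.isEmpty = false ↔ ∃ x, x ∈ l := by
  cases l <;> simp

theorem mergeHit_iff : ∀ (xs ys : List String),
    xs.Pairwise (· ≤ ·) → ys.Pairwise (· ≤ ·) →
    (pvMergeHit xs ys = true ↔ ∃ k, k ∈ xs ∧ k ∈ ys) := by
  intro xs ys
  fun_induction pvMergeHit xs ys with
  | case1 ys => simp
  | case2 x xs => simp
  | case3 x xs y ys heq =>
    intro _ _
    have hxy : x = y := beq_iff_eq.mp heq
    simp
    exact Or.inl (Or.inl hxy)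
  | case4 x xs y ys heq hlt ih =>
    intro hpx hpy
    rw [ih (List.Pairwise.of_cons hpx) hpy]
    constructor
    · rintro ⟨k, hk1, hk2⟩; exact ⟨k, List.mem_cons_of_mem _ hk1, hk2⟩
    · rintro ⟨k, hk1, hk2⟩
      rcases List.mem_cons.mp hk1 with rfl | hk1'
      · -- k cannot lie in y :: ys: k < y ≤ every element there
        exfalso
        rcases List.mem_cons.mp hk2 with rfl | hz'
        · exact lt_irrefl k hlt
        · exact lt_irrefl k (lt_of_lt_of_le hlt ((List.pairwise_cons.mp hpy).1 k hz'))
      · exact ⟨k, hk1', hk2⟩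
  | case5 x xs y ys heq hlt ih =>
    intro hpx hpy
    rw [ih hpx (List.Pairwise.of_cons hpy)]
    constructor
    · rintro ⟨k, hk1, hk2⟩; exact ⟨k, hk1, List.mem_cons_of_mem _ hk2⟩
    · rintro ⟨k, hk1, hk2⟩
      rcases List.mem_cons.mp hk2 with rfl | hk2'
      · -- k cannot lie in x :: xs: x ≤ every element there and ¬ x < k, yet x ≠ k
        exfalso
        rcases List.mem_cons.mp hk1 with rfl | hz'
        · exact heq (beq_iff_eq.mpr rfl)
        · exact heq (beq_iff_eq.mpr
            (le_antisymm ((List.pairwise_cons.mp hpx).1 k hz') (not_lt.mp hlt)))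
      · exact ⟨k, hk1, hk2'⟩

theorem queryKeys_eq (qc : List String) :
    pvQueryKeys qc = qc.flatMap (fun q => ["C" ++ q, "T" ++ pvTbl q]) := by
  unfold pvQueryKeys
  rw [PySem.List.foldl_append_eq_flatMap]
  simp

theorem strongKeys_eq (sc : List String) :
    pvStrongKeys sc = sc.flatMap (fun s =>
      if ((pvSplit s).getD 1 "") == "*"
      then ["T" ++ pvTbl s, "C" ++ s] else ["C" ++ s]) := by
  unfold pvStrongKeys
  rw [PySem.List.foldl_append_eq_flatMap]
  simp

theorem mem_queryKeys (qc : List String) (k : String) :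
    k ∈ pvQueryKeys qc ↔ ∃ q, q ∈ qc ∧ (k = "C" ++ q ∨ k = "T" ++ pvTbl q) := by
  rw [queryKeys_eq]; simp

theorem mem_strongKeys (sc : List String) (k : String) :
    k ∈ pvStrongKeys sc ↔ ∃ s, s ∈ sc ∧
      (k = "C" ++ s ∨ (((pvSplit s).getD 1 "") = "*" ∧ k = "T" ++ pvTbl s)) := by
  rw [strongKeys_eq]
  simp only [List.mem_flatMap, List.getD_eq_getElem?_getD]
  refine exists_congr fun s => and_congr_right fun _ => ?_
  by_cases h : ((pvSplit s)[1]?.getD "") = "*" <;> simp [h] <;> tauto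

theorem ports_agree (qc sc : List String) :
    is_strong_query qc sc = is_strong_query_alt qc sc := by
  unfold is_strong_query is_strong_query_alt
  rw [Bool.eq_iff_iff]
  rw [mergeHit_iff _ _
        (PySem.List.sorted_pairwise (pvQueryKeys qc) (fun x => x))
        (PySem.List.sorted_pairwise (pvStrongKeys sc) (fun x => x))]
  simp only [Bool.or_eq_true, Bool.not_eq_true', isEmpty_false_iff_exists,
    PySem.Set.mem_inter, PySem.Set.mem_ofList, List.mem_map, List.mem_filter,
    PySem.List.mem_sorted, mem_queryKeys, mem_strongKeys]
  constructor
  · rintro (⟨t, ⟨c, hc, rfl⟩, ⟨s, ⟨hs, hw⟩, hts⟩⟩ | ⟨c, hc, hs⟩)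
    · exact ⟨"T" ++ pvTbl c, ⟨c, hc, Or.inr rfl⟩,
        ⟨s, hs, Or.inr ⟨beq_iff_eq.mp hw, by rw [hts]⟩⟩⟩
    · exact ⟨"C" ++ c, ⟨c, hc, Or.inl rfl⟩, ⟨c, hs, Or.inl rfl⟩⟩
  · rintro ⟨k, ⟨q, hq, hkq⟩, ⟨s, hs, hks⟩⟩
    rcases hkq with rfl | rfl
    · rcases hks with h | ⟨hw, h⟩
      · exact Or.inr ⟨q, hq, (tag_inj h) ▸ hs⟩
      · exact absurd h (tag_CT_ne _ _)
    · rcases hks with h | ⟨hw, h⟩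
      · exact absurd h.symm (tag_CT_ne _ _)
      · exact Or.inl ⟨pvTbl q, ⟨q, hq, rfl⟩,
          ⟨s, ⟨hs, beq_iff_eq.mpr hw⟩, (tag_inj h).symm⟩⟩

-- ===== VERDICT (by name: the statement is the Claim_ definition above) =====
theorem is_strong_query_spec : Claim_equal_is_strong_query := by
  intro qc sc _ _
  unfold Spec_is_strong_query
  exact ports_agree qc sc
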